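-- pv_equiv track=rewrite | github.com/AdamZhouSE/pythonHomework | Code/CodeRecords/2921/60643/299041.py | solution
-- ===== SOURCE A (Python) =====
-- def solution(data,d):
--     st=set()
--     for i in data:
--         if i%d not in st:
--             st.add(i%d)
--     if len(st)>1:
--         return -1
--     else:
--         data=sorted(data)
--         ind=len(data)//2
--         tgt=data[ind]
--     cnt=0
--     for i in data:
--         cnt+=abs((i-tgt))//d
--     return cnt
-- ===== SOURCE B (Python) =====
-- def _qsel(xs, k):
--     # k-th smallest of xs (0-based), by three-way partition around a pivot.
--     p = xs[0]
--     lo = [x for x in xs if x < p]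
--     if k < len(lo):
--         return _qsel(lo, k)
--     eq = [x for x in xs if x == p]
--     if k < len(lo) + len(eq):
--         return p
--     hi = [x for x in xs if x > p]
--     return _qsel(hi, k - len(lo) - len(eq))
--
--
-- def solution(data, d):
--     r0 = data[0] % d
--     if any(x % d != r0 for x in data):
--         return -1
--     tgt = _qsel(data, len(data) // 2)
--     return sum(abs(x - tgt) // d for x in data)
-- ===== Notes on version B (the rewrite author's own statement) =====
-- stated objective: alternative
-- what changed: B finds the median by a three-way-partition quickselect instead of fully sorting the list, and tests the all-same-residue condition by comparing every residue with the first element's residue instead of building a set of residues.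
import Mathlib
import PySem

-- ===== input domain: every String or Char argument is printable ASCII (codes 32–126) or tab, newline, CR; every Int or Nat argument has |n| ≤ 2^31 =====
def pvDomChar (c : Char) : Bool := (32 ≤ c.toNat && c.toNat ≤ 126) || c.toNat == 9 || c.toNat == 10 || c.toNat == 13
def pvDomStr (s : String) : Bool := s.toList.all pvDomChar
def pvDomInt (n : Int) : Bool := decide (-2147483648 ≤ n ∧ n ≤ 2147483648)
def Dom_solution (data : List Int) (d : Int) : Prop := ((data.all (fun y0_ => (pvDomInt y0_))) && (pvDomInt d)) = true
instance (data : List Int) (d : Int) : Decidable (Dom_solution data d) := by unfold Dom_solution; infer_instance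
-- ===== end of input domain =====

-- B replaces A's full sort by a three-way-partition quickselect for the median and replaces A's
-- residue-set construction by a scan comparing each residue with the first one (objective: alternative algorithm).

-- ===== PORT A =====
def solution (data : List Int) (d : Int) : Int :=
  let st : PySem.Set Int := data.foldl (fun st i =>
      if PySem.Set.contains st (PySem.Int.mod i d) then st
      else PySem.Set.add st (PySem.Int.mod i d)) PySem.Set.empty
  if 1 < st.length then -1
  else
    let data' := PySem.List.sorted data (fun x => x) false
    let ind : Int := PySem.Int.floordiv (PySem.List.len data') 2
    let tgt := PySem.List.pyGetD data' ind 0   -- data[ind]; the IndexError on [] is excluded by Pre_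
    data'.foldl (fun cnt i => cnt + PySem.Int.floordiv |i - tgt| d) 0

-- ===== PORT B =====
-- _qsel: k-th smallest by three-way partition around the first element (xs[0] raises on []; Pre_ keeps that unreachable)
def qselB : List Int → Nat → Int
  | [], _ => 0
  | p :: rest, k =>
    let lo := (p :: rest).filter (fun x => x < p)
    if k < lo.length then qselB lo k
    else
      let eq := (p :: rest).filter (fun x => x = p)
      if k < lo.length + eq.length then p
      else
        let hi := (p :: rest).filter (fun x => p < x)
        qselB hi (k - lo.length - eq.length)
termination_by xs _ => xs.length
decreasing_by
  · exact List.length_filter_lt_length_iff_exists.mpr ⟨p, List.mem_cons_self, by simp⟩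
  · exact List.length_filter_lt_length_iff_exists.mpr ⟨p, List.mem_cons_self, by simp⟩

def solution_alt (data : List Int) (d : Int) : Int :=
  let r0 := PySem.Int.mod (PySem.List.pyGetD data 0 0) d   -- data[0]; IndexError on [] excluded by Pre_
  if data.any (fun x => PySem.Int.mod x d != r0) then -1
  else
    let tgt := qselB data (data.length / 2)
    (data.map (fun x => PySem.Int.floordiv |x - tgt| d)).sum

-- ===== PRECONDITION & SPEC =====
-- A raises ZeroDivisionError (i % d) when d = 0 and IndexError (data[len(data)//2]) when data = []; Pre_ excludes exactly those.
def Pre_solution (data : List Int) (d : Int) : Prop := data ≠ [] ∧ d ≠ 0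
instance (data : List Int) (d : Int) : Decidable (Pre_solution data d) := by unfold Pre_solution; infer_instance
def pvWitness_solution : List Int × Int := ([0], 1)

def Spec_solution (data : List Int) (d : Int) (out : Int) : Prop := out = solution_alt data d
instance (data : List Int) (d : Int) (out : Int) : Decidable (Spec_solution data d out) := by unfold Spec_solution; infer_instance

-- ===== CLAIM (what is proved, stated in full; the proofs are below) =====
def Claim_equal_solution : Prop := ∀ (data : List Int) (d : Int), Dom_solution data d → Pre_solution data d → Spec_solution data d (solution data d)

-- ===== LEMMAS AND PROOFS =====

lemma length_le_one_of_all_eq {S : List Int} (hnd : S.Nodup) {c : Int} (h : ∀ x ∈ S, x = c) : S.length ≤ 1 := by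
  match S with
  | [] => simp
  | [b] => simp
  | b :: e :: t =>
    have hbe : b = e := (h b (by simp)).trans (h e (by simp)).symm
    simp [hbe] at hnd

lemma one_lt_length_of_two_mem {S : List Int} {x a : Int} (hx : x ∈ S) (ha : a ∈ S) (hne : x ≠ a) : 1 < S.length := by
  match S with
  | [] => simp at hx
  | [b] =>
    simp at hx ha
    exact absurd (hx.trans ha.symm) hne
  | b :: e :: t => simp

-- the set of a nonempty list has more than one element iff some element differs from the first
lemma one_lt_length_ofList (a : Int) (l : List Int) :
    1 < (PySem.Set.ofList (a :: l)).length ↔ ∃ x ∈ l, x ≠ a := by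
  constructor
  · intro h
    by_contra hall
    push Not at hall
    have hmem : ∀ x ∈ PySem.Set.ofList (a :: l), x = a := by
      intro x hx
      rcases List.mem_cons.mp ((PySem.Set.mem_ofList _ _).mp hx) with h' | h'
      · exact h'
      · exact hall _ h'
    have := length_le_one_of_all_eq (PySem.Set.nodup_ofList _) hmem
    omega
  · rintro ⟨x, hx, hne⟩
    exact one_lt_length_of_two_mem ((PySem.Set.mem_ofList _ _).mpr (List.mem_cons_of_mem _ hx))
      ((PySem.Set.mem_ofList _ _).mpr List.mem_cons_self) hne

-- the three-way partition of xs around p is a permutation of xs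
lemma partition_perm (p : Int) (xs : List Int) :
    (xs.filter (fun x => x < p) ++ (xs.filter (fun x => x = p) ++ xs.filter (fun x => p < x))).Perm xs := by
  have h1 := List.filter_append_perm (fun x => decide (x < p)) xs
  have h2 := List.filter_append_perm (fun x => decide (x = p)) (xs.filter (fun x => !decide (x < p)))
  rw [List.filter_filter, List.filter_filter] at h2
  have e1 : xs.filter (fun a => decide (a = p) && !decide (a < p)) = xs.filter (fun x => x = p) := by
    apply List.filter_congr
    intro x _
    by_cases hx : x = p <;> simp [hx]
  have e2 : xs.filter (fun a => !decide (a = p) && !decide (a < p)) = xs.filter (fun x => p < x) := by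
    apply List.filter_congr
    intro x _
    rcases lt_trichotomy x p with h | h | h
    · simp [h, ne_of_lt h, asymm h]
    · simp [h]
    · simp [ne_of_gt h, asymm h, h]
  rw [e1, e2] at h2
  exact (List.Perm.append_left _ h2).trans h1

-- sorted(xs) is the concatenation of the sorted partition pieces
lemma sorted_partition (p : Int) (xs : List Int) :
    PySem.List.sorted xs (fun x => x) false =
      PySem.List.sorted (xs.filter (fun x => x < p)) (fun x => x) false ++
      (xs.filter (fun x => x = p) ++
       PySem.List.sorted (xs.filter (fun x => p < x)) (fun x => x) false) := by
  apply PySem.List.sorted_id_eq_of_perm_of_pairwise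
  · refine List.Perm.trans ?_ (partition_perm p xs)
    exact List.Perm.append (PySem.List.sorted_perm _ _ _)
      (List.Perm.append (List.Perm.refl _) (PySem.List.sorted_perm _ _ _))
  · rw [List.pairwise_append]
    refine ⟨PySem.List.sorted_pairwise _ _, ?_, ?_⟩
    · rw [List.pairwise_append]
      refine ⟨?_, PySem.List.sorted_pairwise _ _, ?_⟩
      · apply List.pairwise_of_forall_mem_list
        intro a ha b hb
        have ha' : a = p := by simpa using (List.mem_filter.mp ha).2
        have hb' : b = p := by simpa using (List.mem_filter.mp hb).2
        omega
      · intro x hx y hy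
        have hx' : x = p := by simpa using (List.mem_filter.mp hx).2
        have hy' : p < y := by simpa using (List.mem_filter.mp ((PySem.List.mem_sorted _ _ _ _).mp hy)).2
        omega
    · intro x hx y hy
      have hx' : x < p := by simpa using (List.mem_filter.mp ((PySem.List.mem_sorted _ _ _ _).mp hx)).2
      rcases List.mem_append.mp hy with h | h
      · have : y = p := by simpa using (List.mem_filter.mp h).2
        omega
      · have : p < y := by simpa using (List.mem_filter.mp ((PySem.List.mem_sorted _ _ _ _).mp h)).2
        omega

-- quickselect computes the k-th element of the sorted list
lemma qselB_eq_sorted_aux : ∀ (n : Nat) (xs : List Int) (k : Nat), xs.length ≤ n → k < xs.length →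
    qselB xs k = (PySem.List.sorted xs (fun x => x) false).getD k 0 := by
  intro n
  induction n with
  | zero => intro xs k hn hk; omega
  | succ n ih =>
    intro xs k hn hk
    match xs with
    | [] => simp at hk
    | p :: rest =>
      have hlen : ((p :: rest).filter (fun x => x < p)).length +
          (((p :: rest).filter (fun x => x = p)).length + ((p :: rest).filter (fun x => p < x)).length) =
          (p :: rest).length := by
        have h := (partition_perm p (p :: rest)).length_eq
        simp only [List.length_append] at h
        omega
      have hlo : ((p :: rest).filter (fun x => x < p)).length < (p :: rest).length :=
        List.length_filter_lt_length_iff_exists.mpr ⟨p, List.mem_cons_self, by simp⟩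
      have hhi : ((p :: rest).filter (fun x => p < x)).length < (p :: rest).length :=
        List.length_filter_lt_length_iff_exists.mpr ⟨p, List.mem_cons_self, by simp⟩
      rw [qselB, sorted_partition p (p :: rest)]
      dsimp only
      by_cases h1 : k < ((p :: rest).filter (fun x => x < p)).length
      · rw [if_pos h1, List.getD_append _ _ _ k (by rwa [PySem.List.length_sorted])]
        exact ih _ k (by omega) h1
      · rw [if_neg h1, List.getD_append_right _ _ _ k (by rw [PySem.List.length_sorted]; omega),
          PySem.List.length_sorted]
        by_cases h2 : k < ((p :: rest).filter (fun x => x < p)).length + ((p :: rest).filter (fun x => x = p)).length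
        · rw [if_pos h2]
          have hj : k - ((p :: rest).filter (fun x => x < p)).length < ((p :: rest).filter (fun x => x = p)).length := by omega
          rw [List.getD_append _ _ _ _ hj, List.getD_eq_getElem _ _ hj]
          have := List.getElem_mem hj
          have hep := (List.mem_filter.mp this).2
          exact (of_decide_eq_true hep).symm
        · rw [if_neg h2]
          have hj : ((p :: rest).filter (fun x => x = p)).length ≤ k - ((p :: rest).filter (fun x => x < p)).length := by omega
          rw [List.getD_append_right _ _ _ _ hj]
          have hk' : k - ((p :: rest).filter (fun x => x < p)).length - ((p :: rest).filter (fun x => x = p)).length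
              < ((p :: rest).filter (fun x => p < x)).length := by omega
          rw [ih _ _ (by omega) hk']

-- ===== VERDICT (by name: the statement is the Claim_ definition above) =====
theorem solution_spec : Claim_equal_solution := by
  intro data d _ hpre
  obtain ⟨hne, _⟩ := hpre
  match data with
  | [] => exact absurd rfl hne
  | h :: t =>
    unfold Spec_solution solution solution_alt
    have hfun : ∀ (st : PySem.Set Int) (i : Int),
        (if PySem.Set.contains st (PySem.Int.mod i d) then st else PySem.Set.add st (PySem.Int.mod i d)) =
        PySem.Set.add st (PySem.Int.mod i d) := by
      intro st i
      by_cases hc : PySem.Set.contains st (PySem.Int.mod i d) = true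
      · rw [if_pos hc, PySem.Set.add_of_mem ((PySem.Set.contains_iff _ _).mp hc)]
      · rw [if_neg hc]
    simp only [hfun]
    rw [← PySem.Set.update_map_eq_foldl_add, PySem.Set.update_empty]
    have hcondA : (1 < (PySem.Set.ofList ((h :: t).map (fun i => PySem.Int.mod i d))).length) ↔
        (∃ x ∈ t, PySem.Int.mod x d ≠ PySem.Int.mod h d) := by
      rw [List.map_cons, one_lt_length_ofList]
      constructor
      · rintro ⟨x, hx, hxe⟩
        obtain ⟨a, ha, rfl⟩ := List.mem_map.mp hx
        exact ⟨a, ha, hxe⟩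
      · rintro ⟨a, ha, hae⟩
        exact ⟨_, List.mem_map_of_mem ha, hae⟩
    have hcondB : ((h :: t).any (fun x => PySem.Int.mod x d != PySem.Int.mod (PySem.List.pyGetD (h :: t) 0 0) d) = true) ↔
        (∃ x ∈ t, PySem.Int.mod x d ≠ PySem.Int.mod h d) := by
      rw [PySem.List.pyGetD_zero_cons, List.any_eq_true]
      simp only [bne_iff_ne]
      constructor
      · rintro ⟨x, hx, hxe⟩
        rcases List.mem_cons.mp hx with rfl | hx'
        · exact absurd rfl hxe
        · exact ⟨x, hx', hxe⟩
      · rintro ⟨x, hx, hxe⟩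
        exact ⟨x, List.mem_cons_of_mem _ hx, hxe⟩
    by_cases hx : ∃ x ∈ t, PySem.Int.mod x d ≠ PySem.Int.mod h d
    · rw [if_pos (hcondA.mpr hx), if_pos (hcondB.mpr hx)]
    · rw [if_neg (fun hc => hx (hcondA.mp hc)), if_neg (fun hc => hx (hcondB.mp hc))]
      have hlt2 : (h :: t).length / 2 < (h :: t).length := Nat.div_lt_self (by simp) (by omega)
      have htgt : PySem.List.pyGetD (PySem.List.sorted (h :: t) (fun x => x) false)
          (PySem.Int.floordiv (PySem.List.len (PySem.List.sorted (h :: t) (fun x => x) false)) 2) 0 =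
          qselB (h :: t) ((h :: t).length / 2) := by
        rw [PySem.List.len_eq, PySem.List.length_sorted]
        have h2 : PySem.Int.floordiv (((h :: t).length : Int)) 2 = (((h :: t).length / 2 : Nat) : Int) := by
          exact_mod_cast PySem.Int.floordiv_natCast (h :: t).length 2
        rw [h2, PySem.List.pyGetD_natCast, qselB_eq_sorted_aux (h :: t).length (h :: t) _ le_rfl hlt2]
      rw [htgt, PySem.List.foldl_add, zero_add]
      exact List.Perm.sum_eq (List.Perm.map _ (PySem.List.sorted_perm _ _ _))
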